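-- pv_equiv track=rewrite | github.com/prindas84/Computing-Algorithms-2801ICT | WORKSHOP ASSIGNMENTS/ASSIGNMENT 4/encrypting_intervals.py | find_prime_range
-- ===== SOURCE A (Python) =====
-- import math
--
-- def find_prime_base(high):
--
-- 	"""	REFERENCE: https://www.geeksforgeeks.org/segmented-sieve-print-primes-in-a-range/
-- 		I have made some alterations, however I borrowed the main concepts from this website. """
--
-- 	base_numbers = []                                   # Initialise a list to store the base prime numbers under the high limit of sqrt(high)
-- 	n = int(math.sqrt(high))							# Find the sqrt(high) to be the limit to stop the search.
-- 	valid_primes = [True for i in range(n + 1)]			# Initialise boolean array of all numbers to the high limit.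
--
--
-- 	# Starting from i = 2, set all multiples of i - that are greater than i - to False (not a prime number).
-- 	for i in range(2, n + 1):
-- 		if valid_primes[i]:
-- 			for j in range(i * i, n + 1, i):
-- 				valid_primes[j] = False
--
-- 	# Starting from index 2, loop the list to find all numbers below n that are set to True (are prime numbers).
-- 	for k in range(2, n + 1):
-- 		if valid_primes[k]:
-- 			base_numbers.append(k)
--
-- 	# Return the list of base prime numbers to continue the next calculations.
-- 	return base_numbers
--
-- def find_prime_range(low, high):
--
-- 	"""	REFERENCE: https://www.geeksforgeeks.org/segmented-sieve-print-primes-in-a-range/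
-- 		I have made some alterations, however I borrowed the main concepts from this website. """
--
-- 	# Find the base prime numbers required to complete the required calculations.
-- 	base_numbers = find_prime_base(high)
--
-- 	# Initialise boolean array of all numbers between the low - high limit.
-- 	prime_range = [True for i in range(high + 1)]
-- 	prime_range[0], prime_range[1] = False, False
--
-- 	# Starting from the first base prime number, set all multiples of i - that are greater than i - to False (not a prime number).
-- 	for i in base_numbers:
-- 		lower = (low // i)
-- 		if lower <= 1:
-- 			lower = i + i
-- 		elif (low % i) != 0:
-- 			lower = (lower * i) + i
-- 		else:
-- 			lower = lower * i
-- 		for j in range(lower, high + 1, i):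
-- 			prime_range[j] = False
--
-- 	return prime_range
-- ===== SOURCE B (Python) =====
-- import math
--
-- def find_prime_range(low, high):
--     # Simpler rewrite: trial-division base primes, then a direct divisibility
--     # test on each candidate in [low, high] instead of striding multiples.
--     n = int(math.sqrt(high))
--     base = [c for c in range(2, n + 1) if all(c % d for d in range(2, c))]
--     prime_range = [True] * (high + 1)
--     prime_range[0], prime_range[1] = False, False
--     for j in range(max(low, 2), high + 1):
--         if any(j % p == 0 and p < j for p in base):
--             prime_range[j] = False
--     return prime_range
-- ===== Notes on version B (the rewrite author's own statement) =====
-- stated objective: simpler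
-- what changed: Replaces the sieve-of-Eratosthenes base-prime computation with a trial-division filter and replaces the multiple-striding marking loops with a single pass over the candidates in [low, high] that tests each candidate for a proper base-prime divisor.
import Mathlib
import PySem

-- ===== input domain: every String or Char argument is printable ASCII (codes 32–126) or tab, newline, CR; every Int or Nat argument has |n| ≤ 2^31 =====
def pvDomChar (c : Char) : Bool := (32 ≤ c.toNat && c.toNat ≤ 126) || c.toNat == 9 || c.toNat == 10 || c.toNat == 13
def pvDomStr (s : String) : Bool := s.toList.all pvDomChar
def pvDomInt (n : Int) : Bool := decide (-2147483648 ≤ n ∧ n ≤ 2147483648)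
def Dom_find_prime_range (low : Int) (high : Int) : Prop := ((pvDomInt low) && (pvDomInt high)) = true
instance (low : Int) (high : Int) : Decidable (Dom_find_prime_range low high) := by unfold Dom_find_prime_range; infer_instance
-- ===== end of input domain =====

-- B changes A's segmented sieve into a trial-division base-prime filter plus a per-candidate
-- divisibility test over [low, high] — simpler code, same exact output (not faster).

-- ===== PORT A =====
-- find_prime_base(high): sieve of Eratosthenes up to n = int(math.sqrt(high)).
-- Loop indices are nonnegative Python ints, transliterated as Nat:
-- range(2, n+1) is List.range' 2 (n-1); range(i*i, n+1, i) is List.range' (i*i) ((n+i-i*i)/i) i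
-- (same elements in the same order; (n+i-i*i)/i is exactly the element count of range(i*i, n+1, i)).
-- int(math.sqrt(high)) = Nat.sqrt high.toNat, exact for 0 ≤ high ≤ 2^31 (float sqrt is correctly
-- rounded there); high < 0, where Python raises ValueError, is excluded by Pre_.
def find_prime_base (high : Int) : List Int :=
  let n : Nat := Nat.sqrt high.toNat
  let valid_primes : List Bool := List.replicate (n + 1) true
  let valid_primes := (List.range' 2 (n - 1)).foldl (fun vp i =>
    if vp.getD i true then
      (List.range' (i * i) ((n + i - i * i) / i) i).foldl (fun vp j => vp.set j false) vp
    else vp) valid_primes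
  (List.range' 2 (n - 1)).foldl (fun acc k =>
    if valid_primes.getD k true then acc ++ [(k : Int)] else acc) []

def find_prime_range (low : Int) (high : Int) : List Bool :=
  let base_numbers := find_prime_base high
  let prime_range : List Bool := List.replicate (high + 1).toNat true
  let prime_range := PySem.List.pySetD prime_range 0 false
  let prime_range := PySem.List.pySetD prime_range 1 false
  base_numbers.foldl (fun pr i =>
    let q := PySem.Int.floordiv low i
    let lower := if q ≤ 1 then i + i
                 else if PySem.Int.mod low i ≠ 0 then q * i + i
                 else q * i
    (PySem.List.pyRange lower (high + 1) i).foldl (fun pr j => PySem.List.pySetD pr j false) pr) prime_range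

-- ===== PORT B =====
-- Source B: base primes by trial division (all(c % d for d in range(2, c))), then one pass
-- j = max(low,2) .. high testing each j for a proper base-prime divisor.
def find_prime_range_alt (low : Int) (high : Int) : List Bool :=
  let n : Nat := Nat.sqrt high.toNat
  let base : List Nat := (List.range' 2 (n - 1)).filter
    (fun c => (List.range' 2 (c - 2)).all (fun d => c % d ≠ 0))
  let prime_range : List Bool := List.replicate (high + 1).toNat true
  let prime_range := PySem.List.pySetD prime_range 0 false
  let prime_range := PySem.List.pySetD prime_range 1 false
  (PySem.List.pyRange (max low 2) (high + 1) 1).foldl (fun pr j =>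
    if base.any (fun p => PySem.Int.mod j (p : Int) == 0 && (p : Int) < j) then
      PySem.List.pySetD pr j false
    else pr) prime_range

-- ===== PRECONDITION & SPEC =====
-- Pre_ excludes exactly the inputs where Python A raises: high < 0 (math.sqrt ValueError)
-- and high ∈ {0} (prime_range[1] IndexError); B raises on the same inputs.
def Pre_find_prime_range (low : Int) (high : Int) : Prop := 1 ≤ high
instance (low : Int) (high : Int) : Decidable (Pre_find_prime_range low high) := by unfold Pre_find_prime_range; infer_instance
def pvWitness_find_prime_range : Int × Int := (10, 30)

def Spec_find_prime_range (low : Int) (high : Int) (out : List Bool) : Prop := out = find_prime_range_alt low high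
instance (low : Int) (high : Int) (out : List Bool) : Decidable (Spec_find_prime_range low high out) := by unfold Spec_find_prime_range; infer_instance

-- ===== CLAIM (what is proved, stated in full; the proofs are below) =====
def Claim_equal_find_prime_range : Prop := ∀ (low : Int) (high : Int), Dom_find_prime_range low high → Pre_find_prime_range low high → Spec_find_prime_range low high (find_prime_range low high)

-- ===== LEMMAS AND PROOFS =====

lemma pv_setFold_nat (js : List Nat) (l : List Bool) (k : Nat) :
    (js.foldl (fun l j => l.set j false) l)[k]? =
      if k ∈ js ∧ k < l.length then some false else l[k]? := by
  induction js generalizing l with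
  | nil => simp
  | cons j js ih =>
    simp only [List.foldl_cons]
    rw [ih]
    simp only [List.length_set, List.getElem?_set, List.mem_cons]
    by_cases hk : k < l.length
    · by_cases hjk : j = k
      · subst hjk; simp [hk]
      · by_cases hmem : k ∈ js <;> simp [hjk, Ne.symm hjk, hmem, hk]
    · simp only [hk, and_false, if_false]
      by_cases hjk : j = k <;> simp [hjk, hk]

lemma pv_setFold_nat_len (js : List Nat) (l : List Bool) :
    (js.foldl (fun l j => l.set j false) l).length = l.length := by
  induction js generalizing l with
  | nil => rfl
  | cons j js ih => simp [List.foldl_cons, ih]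

lemma pv_mem_stride {i n j : Nat} (hi : 2 ≤ i) :
    j ∈ List.range' (i*i) ((n + i - i*i)/i) i ↔ i ∣ j ∧ i*i ≤ j ∧ j ≤ n := by
  rw [List.mem_range']
  constructor
  · rintro ⟨t, ht, rfl⟩
    have h1 : (t+1) * i ≤ n + i - i*i := (Nat.le_div_iff_mul_le (by omega)).mp ht
    have h2 : (t+1) * i = i*t + i := by ring
    exact ⟨⟨i + t, by ring⟩, by omega, by omega⟩
  · rintro ⟨⟨m, rfl⟩, h1, h2⟩
    have him : i ≤ m := Nat.le_of_mul_le_mul_left h1 (by omega)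
    have e1 : i * (m - i) + i * i = i * m := by
      rw [← Nat.mul_add, Nat.sub_add_cancel him]
    refine ⟨m - i, ?_, by omega⟩
    have e2 : (m - i + 1) * i = i * (m - i) + i := by ring
    have : m - i + 1 ≤ (n + i - i*i) / i := by
      rw [Nat.le_div_iff_mul_le (by omega)]; omega
    omega

def pvStep (n : Nat) (vp : List Bool) (i : Nat) : List Bool :=
  if vp.getD i true then
    (List.range' (i*i) ((n + i - i*i)/i) i).foldl (fun vp j => vp.set j false) vp
  else vp

def pvSieve (n m : Nat) : List Bool := (List.range' 2 m).foldl (pvStep n) (List.replicate (n+1) true)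

lemma pvStep_len (n : Nat) (vp : List Bool) (i : Nat) : (pvStep n vp i).length = vp.length := by
  unfold pvStep; split
  · exact pv_setFold_nat_len _ _
  · rfl

lemma pvSieve_len (n m : Nat) : (pvSieve n m).length = n + 1 := by
  induction m with
  | zero => simp [pvSieve]
  | succ m ih =>
    unfold pvSieve at *
    rw [List.range'_concat, List.foldl_append]
    simp [pvStep_len, ih]

lemma pvSieve_char (n m : Nat) (hm : m ≤ n - 1) : ∀ k, k ≤ n →
    ((pvSieve n m)[k]? = some false ↔ ∃ p, Nat.Prime p ∧ p < 2 + m ∧ p ∣ k ∧ p*p ≤ k) := by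
  induction m with
  | zero =>
    intro k hk
    simp only [pvSieve, List.range'_zero, List.foldl_nil]
    rw [List.getElem?_replicate]
    constructor
    · intro h; simp only [if_pos (by omega : k < n + 1)] at h; cases h
    · rintro ⟨p, hp, hlt, -⟩
      exact absurd hlt (by have := hp.two_le; omega)
  | succ m ih =>
    intro k hk
    have hn2 : 2 ≤ n := by omega
    have hi : 2 + m ≤ n := by omega
    have ih' := ih (by omega)
    have hlen : (pvSieve n m).length = n + 1 := pvSieve_len n m
    have hstep : pvSieve n (m+1) = pvStep n (pvSieve n m) (2 + m) := by
      unfold pvSieve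
      rw [List.range'_concat, List.foldl_append]
      simp
    -- the guard equals primality of i := 2 + m
    have hguard : ((pvSieve n m).getD (2+m) true = true) ↔ Nat.Prime (2+m) := by
      have hsome : (pvSieve n m)[2+m]? = some ((pvSieve n m).getD (2+m) true) := by
        rw [List.getD_eq_getElem?_getD]
        cases h : (pvSieve n m)[2+m]? with
        | none => exact absurd (List.getElem?_eq_none_iff.mp h) (by omega)
        | some b => rfl
      constructor
      · intro hg
        by_contra hnp
        have h0 : (pvSieve n m)[2+m]? = some false := by
          rw [ih' (2+m) hi]
          refine ⟨(2+m).minFac, Nat.minFac_prime (by omega), ?_, Nat.minFac_dvd _, ?_⟩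
          · have hle : (2+m).minFac ≤ 2+m := Nat.le_of_dvd (by omega) (Nat.minFac_dvd _)
            have hne : (2+m).minFac ≠ 2+m := fun h => hnp (h ▸ Nat.minFac_prime (by omega : 2+m ≠ 1))
            omega
          · have := Nat.minFac_sq_le_self (by omega : 0 < 2+m) hnp
            simpa [pow_two] using this
        rw [h0] at hsome; rw [hg] at hsome; cases hsome
      · intro hp
        by_contra hg
        have hb : (pvSieve n m).getD (2+m) true = false := by
          cases h : (pvSieve n m).getD (2+m) true
          · rfl
          · exact absurd h hg
        rw [hb] at hsome
        rw [ih' (2+m) hi] at hsome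
        obtain ⟨p, hpp, hplt, hpd, hpsq⟩ := hsome
        rcases (Nat.Prime.eq_one_or_self_of_dvd hp p hpd) with h1 | h1
        · exact absurd h1 hpp.one_lt.ne'
        · omega
    rw [hstep]
    unfold pvStep
    by_cases hg : (pvSieve n m).getD (2+m) true = true
    · have hp : Nat.Prime (2+m) := hguard.mp hg
      rw [if_pos hg, pv_setFold_nat]
      simp only [pv_mem_stride (show (2:ℕ) ≤ 2+m by omega)]
      by_cases hmem : (2+m) ∣ k ∧ (2+m)*(2+m) ≤ k ∧ k ≤ n
      · rw [if_pos ⟨hmem, by omega⟩]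
        constructor
        · intro _; exact ⟨2+m, hp, by omega, hmem.1, hmem.2.1⟩
        · intro _; rfl
      · rw [if_neg (by tauto)]
        rw [ih' k hk]
        constructor
        · rintro ⟨p, h1, h2, h3, h4⟩; exact ⟨p, h1, by omega, h3, h4⟩
        · rintro ⟨p, h1, h2, h3, h4⟩
          refine ⟨p, h1, ?_, h3, h4⟩
          rcases Nat.lt_or_ge p (2+m) with h | h
          · omega
          · exfalso
            have hpe : p = 2+m := by omega
            subst hpe
            exact hmem ⟨h3, h4, hk⟩
    · have hnp : ¬ Nat.Prime (2+m) := fun h => hg (hguard.mpr h)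
      rw [if_neg hg]
      rw [ih' k hk]
      constructor
      · rintro ⟨p, h1, h2, h3, h4⟩; exact ⟨p, h1, by omega, h3, h4⟩
      · rintro ⟨p, h1, h2, h3, h4⟩
        refine ⟨p, h1, ?_, h3, h4⟩
        rcases Nat.lt_or_ge p (2+m) with h | h
        · omega
        · have : p = 2+m := by omega
          subst this
          exact absurd h1 hnp

lemma pv_sieve_eq (n : Nat) :
    (List.range' 2 (n-1)).foldl (fun vp i => if vp.getD i true then
        (List.range' (i*i) ((n + i - i*i)/i) i).foldl (fun vp j => vp.set j false) vp
      else vp) (List.replicate (n+1) true) = pvSieve n (n-1) := rfl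

lemma pv_not_prime_iff (n k : Nat) (h2 : 2 ≤ k) (hkn : k ≤ n) :
    (∃ p, Nat.Prime p ∧ p < 2 + (n-1) ∧ p ∣ k ∧ p*p ≤ k) ↔ ¬ Nat.Prime k := by
  constructor
  · rintro ⟨p, hp, -, hpd, hpsq⟩ hk
    rcases hk.eq_one_or_self_of_dvd p hpd with h | h
    · exact hp.one_lt.ne' h
    · subst h; nlinarith [hp.two_le]
  · intro hk
    have hsq : k.minFac * k.minFac ≤ k := by
      have := Nat.minFac_sq_le_self (by omega : 0 < k) hk
      simpa [pow_two] using this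
    have hpos : 1 ≤ k.minFac := (Nat.minFac_prime (by omega : k ≠ 1)).one_lt.le.trans' (by omega)
    have hle : k.minFac ≤ k.minFac * k.minFac := Nat.le_mul_of_pos_left _ (by omega)
    exact ⟨k.minFac, Nat.minFac_prime (by omega), by omega, Nat.minFac_dvd _, hsq⟩

lemma pv_getD_prime (n k : Nat) (hk2 : 2 ≤ k) (hkn : k ≤ n) :
    (pvSieve n (n-1)).getD k true = decide (Nat.Prime k) := by
  have hlen := pvSieve_len n (n-1)
  have hsome : (pvSieve n (n-1))[k]? = some ((pvSieve n (n-1)).getD k true) := by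
    rw [List.getD_eq_getElem?_getD]
    cases h : (pvSieve n (n-1))[k]? with
    | none => exact absurd (List.getElem?_eq_none_iff.mp h) (by omega)
    | some b => rfl
  have hchar := (pvSieve_char n (n-1) (le_refl _) k hkn).trans (pv_not_prime_iff n k hk2 hkn)
  by_cases hp : Nat.Prime k
  · simp only [hp, decide_true]
    cases h : (pvSieve n (n-1)).getD k true
    · rw [h] at hsome; exact absurd (hchar.mp hsome) (by simpa using hp)
    · rfl
  · simp only [hp, decide_false]
    cases h : (pvSieve n (n-1)).getD k true
    · rfl
    · rw [h] at hsome
      exact absurd (hchar.mpr hp) (by rw [hsome]; simp)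

lemma pv_base_eq (high : Int) :
    find_prime_base high =
      List.map (fun k : Nat => (k : Int))
        (List.filter (fun c => decide (Nat.Prime c)) (List.range' 2 (Nat.sqrt high.toNat - 1))) := by
  unfold find_prime_base
  dsimp only
  rw [pv_sieve_eq]
  rw [PySem.List.foldl_append_if (fun k => (pvSieve (Nat.sqrt high.toNat) (Nat.sqrt high.toNat - 1)).getD k true) (fun k => (k : Int))]
  rw [List.nil_append]
  refine congrArg (List.map _) (List.filter_congr (fun c hc => ?_))
  have := List.mem_range'_1.mp hc
  exact pv_getD_prime _ c (by omega) (by omega)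

lemma pv_baseB_eq (n : Nat) :
    List.filter (fun c => (List.range' 2 (c-2)).all (fun d => c % d ≠ 0)) (List.range' 2 (n-1)) =
    List.filter (fun c => decide (Nat.Prime c)) (List.range' 2 (n-1)) := by
  apply List.filter_congr
  intro c hc
  have hcb := List.mem_range'_1.mp hc
  have h2 : 2 ≤ c := hcb.1
  have hiff : (∀ d ∈ List.range' 2 (c-2), c % d ≠ 0) ↔ Nat.Prime c := by
    constructor
    · intro h
      rw [Nat.prime_def_lt]
      refine ⟨h2, fun m hm hmd => ?_⟩
      by_contra hm1
      rcases Nat.lt_or_ge m 2 with hm2 | hm2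
      · interval_cases m
        · exact absurd (Nat.eq_zero_of_zero_dvd hmd) (by omega)
        · exact hm1 rfl
      · exact h m (List.mem_range'_1.mpr ⟨hm2, by omega⟩)
          (Nat.dvd_iff_mod_eq_zero.mp hmd)
    · intro hp d hd hmod
      have hdb := List.mem_range'_1.mp hd
      have hdd : d ∣ c := Nat.dvd_of_mod_eq_zero hmod
      rcases hp.eq_one_or_self_of_dvd d hdd with h | h <;> omega
  by_cases hp : Nat.Prime c
  · rw [decide_eq_true hp]
    rw [List.all_eq_true.mpr (fun d hd => by simpa using hiff.mpr hp d hd)]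
  · have hex : ¬ ∀ d ∈ List.range' 2 (c-2), c % d ≠ 0 := fun hall => hp (hiff.mp hall)
    push_neg at hex
    obtain ⟨d, hd, hdm⟩ := hex
    rw [decide_eq_false hp, List.all_eq_false]
    exact ⟨d, hd, by simpa using hdm⟩

def pvLower (low i : Int) : Int :=
  if PySem.Int.floordiv low i ≤ 1 then i + i
  else if PySem.Int.mod low i ≠ 0 then PySem.Int.floordiv low i * i + i
  else PySem.Int.floordiv low i * i

lemma pv_lower_facts (low i : Int) (hi : 2 ≤ i) : i ∣ pvLower low i ∧ 0 < pvLower low i := by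
  unfold pvLower
  have h0 : (0:Int) < i := by omega
  split_ifs with h1 h2
  · exact ⟨⟨2, by ring⟩, by omega⟩
  · have hq : (2:Int) ≤ PySem.Int.floordiv low i := by omega
    have h2i : 2*i ≤ PySem.Int.floordiv low i * i := mul_le_mul_of_nonneg_right hq (by omega)
    exact ⟨⟨PySem.Int.floordiv low i + 1, by ring⟩, by omega⟩
  · have hq : (2:Int) ≤ PySem.Int.floordiv low i := by omega
    have h2i : 2*i ≤ PySem.Int.floordiv low i * i := mul_le_mul_of_nonneg_right hq (by omega)
    exact ⟨⟨PySem.Int.floordiv low i, by ring⟩, by omega⟩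

lemma pv_lower_le (low i k : Int) (hi : 2 ≤ i) (hd : i ∣ k) :
    pvLower low i ≤ k ↔ 2*i ≤ k ∧ low ≤ k := by
  have h0 : (0:Int) < i := by omega
  have hq : PySem.Int.floordiv low i = low / i := PySem.Int.floordiv_eq_ediv_of_pos h0
  have hr : PySem.Int.mod low i = low % i := PySem.Int.mod_eq_emod_of_pos h0
  have hlow : i * (low / i) + low % i = low := Int.ediv_add_emod low i
  have hr0 : 0 ≤ low % i := Int.emod_nonneg low (by omega)
  have hri : low % i < i := Int.emod_lt_of_pos low h0
  have hc : low / i * i = i * (low / i) := mul_comm _ _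
  obtain ⟨t, rfl⟩ := hd
  unfold pvLower
  rw [hq, hr]
  split_ifs with h1 h2
  · constructor
    · intro h
      have hm : i * (low / i) ≤ i * 1 := mul_le_mul_of_nonneg_left h1 (by omega)
      have e : i * 1 = i := by ring
      exact ⟨by omega, by omega⟩
    · rintro ⟨h, -⟩; omega
  · constructor
    · intro h
      have h2i : 2*i ≤ low / i * i := mul_le_mul_of_nonneg_right (by omega) (by omega)
      exact ⟨by omega, by omega⟩
    · rintro ⟨h2k, hlk⟩
      have hqt : low / i < t := by
        by_contra hh
        push_neg at hh
        have hm : i * t ≤ i * (low / i) := mul_le_mul_of_nonneg_left hh (by omega)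
        omega
      have hm : (low / i + 1) * i ≤ t * i := mul_le_mul_of_nonneg_right (by omega) (by omega)
      have e : (low / i + 1) * i = low / i * i + i := by ring
      have e2 : t * i = i * t := by ring
      omega
  · constructor
    · intro h
      have h2i : 2*i ≤ low / i * i := mul_le_mul_of_nonneg_right (by omega) (by omega)
      exact ⟨by omega, by omega⟩
    · rintro ⟨-, hlk⟩; omega

lemma pv_setFold_int (js : List Int) (hjs : ∀ j ∈ js, 0 ≤ j) (l : List Bool) (k : Nat) :
    (js.foldl (fun l j => PySem.List.pySetD l j false) l)[k]? =
      if (k:Int) ∈ js ∧ k < l.length then some false else l[k]? := by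
  induction js generalizing l with
  | nil => simp
  | cons j js ih =>
    have hj : 0 ≤ j := hjs j (List.mem_cons_self)
    simp only [List.foldl_cons]
    rw [ih (fun x hx => hjs x (List.mem_cons_of_mem _ hx))]
    rw [PySem.List.pySetD_of_nonneg _ _ hj]
    simp only [List.length_set, List.getElem?_set, List.mem_cons]
    by_cases hk : k < l.length
    · by_cases hj' : j.toNat = k
      · have : (k:Int) = j := by omega
        simp [hj', hk, this.symm]
      · have hne : ¬ (k:Int) = j := by omega
        by_cases hmem : (k:Int) ∈ js <;> simp [hj', hne, hmem, hk]
    · simp only [hk, and_false, if_false]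
      by_cases hj' : j.toNat = k <;> simp [hj', hk]

lemma pv_setFold_int_len (js : List Int) (l : List Bool) :
    (js.foldl (fun l j => PySem.List.pySetD l j false) l).length = l.length := by
  induction js generalizing l with
  | nil => rfl
  | cons j js ih => simp [List.foldl_cons, ih, PySem.List.length_pySetD]

lemma pv_setFold_test (test : Int → Bool) (js : List Int) (hjs : ∀ j ∈ js, 0 ≤ j)
    (l : List Bool) (k : Nat) :
    (js.foldl (fun l j => if test j then PySem.List.pySetD l j false else l) l)[k]? =
      if ((k:Int) ∈ js ∧ test (k:Int) = true) ∧ k < l.length then some false else l[k]? := by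
  induction js generalizing l with
  | nil => simp
  | cons j js ih =>
    have hj : 0 ≤ j := hjs j (List.mem_cons_self)
    simp only [List.foldl_cons]
    rw [ih (fun x hx => hjs x (List.mem_cons_of_mem _ hx))]
    by_cases ht : test j = true
    · rw [if_pos ht, PySem.List.pySetD_of_nonneg _ _ hj]
      simp only [List.length_set, List.getElem?_set, List.mem_cons]
      by_cases hk : k < l.length
      · by_cases hj' : j.toNat = k
        · have hje : (k:Int) = j := by omega
          simp [hj', hk, hje.symm, hje ▸ ht]
        · have hne : ¬ (k:Int) = j := by omega
          by_cases hmem : (k:Int) ∈ js ∧ test (k:Int) = true <;> simp [hj', hne, hmem, hk]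
      · simp only [hk, and_false, if_false]
        by_cases hj' : j.toNat = k <;> simp [hj', hk]
    · rw [if_neg ht]
      simp only [List.mem_cons]
      by_cases hke : (k:Int) = j
      · rw [hke]
        simp [ht]
      · by_cases hmem : (k:Int) ∈ js ∧ test (k:Int) = true <;> simp [hke, hmem]

lemma pv_markA (low high : Int) (bs : List Int) (hbs : ∀ i ∈ bs, 2 ≤ i) (l : List Bool) (k : Nat) :
    (bs.foldl (fun pr i =>
        (PySem.List.pyRange (pvLower low i) (high+1) i).foldl
          (fun pr j => PySem.List.pySetD pr j false) pr) l)[k]? =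
      if (∃ i ∈ bs, (k:Int) ∈ PySem.List.pyRange (pvLower low i) (high+1) i) ∧ k < l.length
      then some false else l[k]? := by
  induction bs generalizing l with
  | nil => simp
  | cons i bs ih =>
    have hi2 : 2 ≤ i := hbs i (List.mem_cons_self)
    have hjs : ∀ j ∈ PySem.List.pyRange (pvLower low i) (high+1) i, 0 ≤ j := by
      intro j hjm
      have h1 := ((PySem.List.mem_pyRange_iff_of_pos (by omega : (0:Int) < i) j).mp hjm).1
      have h2 := (pv_lower_facts low i hi2).2
      omega
    simp only [List.foldl_cons]
    rw [ih (fun x hx => hbs x (List.mem_cons_of_mem _ hx))]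
    rw [pv_setFold_int _ hjs l k, pv_setFold_int_len]
    by_cases hk : k < l.length
    · by_cases hm1 : (k:Int) ∈ PySem.List.pyRange (pvLower low i) (high+1) i
      · simp [List.mem_cons, hm1, hk]
      · by_cases hm2 : ∃ x ∈ bs, (k:Int) ∈ PySem.List.pyRange (pvLower low x) (high+1) x <;>
          simp [List.mem_cons, hm1, hm2, hk]
    · simp [hk]

def pvInit (high : Int) : List Bool :=
  PySem.List.pySetD (PySem.List.pySetD (List.replicate (high+1).toNat true) 0 false) 1 false

lemma pv_A_eq (low high : Int) :
    find_prime_range low high =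
      (find_prime_base high).foldl (fun pr i =>
        (PySem.List.pyRange (pvLower low i) (high+1) i).foldl
          (fun pr j => PySem.List.pySetD pr j false) pr) (pvInit high) := rfl

lemma pv_B_eq (low high : Int) :
    find_prime_range_alt low high =
      (PySem.List.pyRange (max low 2) (high+1) 1).foldl (fun pr j =>
        if ((List.range' 2 (Nat.sqrt high.toNat - 1)).filter
              (fun c => (List.range' 2 (c-2)).all (fun d => c % d ≠ 0))).any
            (fun p => PySem.Int.mod j (p:Int) == 0 && (p:Int) < j) then
          PySem.List.pySetD pr j false
        else pr) (pvInit high) := rfl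

theorem pv_main (low high : Int) (hpre : 1 ≤ high) :
    find_prime_range low high = find_prime_range_alt low high := by
  rw [pv_A_eq, pv_B_eq, pv_base_eq, pv_baseB_eq]
  have hPmem : ∀ p ∈ List.filter (fun c => decide (Nat.Prime c))
      (List.range' 2 (Nat.sqrt high.toNat - 1)), 2 ≤ p ∧ Nat.Prime p := by
    intro p hp
    obtain ⟨hm, hd⟩ := List.mem_filter.mp hp
    exact ⟨(List.mem_range'_1.mp hm).1, of_decide_eq_true hd⟩
  have hbs : ∀ i ∈ (List.filter (fun c => decide (Nat.Prime c))
      (List.range' 2 (Nat.sqrt high.toNat - 1))).map (fun k : Nat => (k:Int)), 2 ≤ i := by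
    intro i hi
    obtain ⟨p, hp, rfl⟩ := List.mem_map.mp hi
    exact_mod_cast (hPmem p hp).1
  have hlen : (pvInit high).length = (high+1).toNat := by
    simp [pvInit, PySem.List.length_pySetD]
  apply List.ext_getElem?
  intro k
  rw [pv_markA low high _ hbs]
  rw [pv_setFold_test _ _ (fun j hj => by
    have := (PySem.List.mem_pyRange_one.mp hj).1
    omega)]
  rw [hlen]
  by_cases hk : k < (high+1).toNat
  case neg => simp [hk]
  have hkh : (k:Int) < high + 1 := by omega
  have hcond :
      (∃ i ∈ (List.filter (fun c => decide (Nat.Prime c))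
          (List.range' 2 (Nat.sqrt high.toNat - 1))).map (fun k : Nat => (k:Int)),
        (k:Int) ∈ PySem.List.pyRange (pvLower low i) (high+1) i)
      ↔ ((k:Int) ∈ PySem.List.pyRange (max low 2) (high+1) 1 ∧
          ((List.filter (fun c => decide (Nat.Prime c))
             (List.range' 2 (Nat.sqrt high.toNat - 1))).any
            (fun p => PySem.Int.mod (k:Int) (p:Int) == 0 && (p:Int) < (k:Int))) = true) := by
    constructor
    · rintro ⟨i, hi, hmem⟩
      obtain ⟨p, hpP, rfl⟩ := List.mem_map.mp hi
      obtain ⟨hp2n, hpprime⟩ := hPmem p hpP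
      have hp2 : (2:Int) ≤ (p:Int) := by exact_mod_cast hp2n
      obtain ⟨h1, h2, h3⟩ := (PySem.List.mem_pyRange_iff_of_pos (by omega) _).mp hmem
      have hdl := (pv_lower_facts low (p:Int) hp2).1
      have hdk : (p:Int) ∣ (k:Int) := by
        have := dvd_add h3 hdl
        simpa using this
      have hle := (pv_lower_le low (p:Int) (k:Int) hp2 hdk).mp h1
      have h2k : (2:Int) ≤ (k:Int) := by omega
      refine ⟨PySem.List.mem_pyRange_one.mpr ⟨max_le hle.2 h2k, hkh⟩, ?_⟩
      rw [List.any_eq_true]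
      refine ⟨p, hpP, ?_⟩
      rw [Bool.and_eq_true, beq_iff_eq, decide_eq_true_eq]
      exact ⟨(PySem.Int.mod_eq_zero_iff_dvd _ _).mpr hdk, by omega⟩
    · rintro ⟨hmem1, hany⟩
      obtain ⟨hmax, -⟩ := PySem.List.mem_pyRange_one.mp hmem1
      obtain ⟨p, hpP, hptest⟩ := List.any_eq_true.mp hany
      obtain ⟨hp2n, hpprime⟩ := hPmem p hpP
      have hp2 : (2:Int) ≤ (p:Int) := by exact_mod_cast hp2n
      rw [Bool.and_eq_true, beq_iff_eq, decide_eq_true_eq] at hptest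
      obtain ⟨hmod, hplt⟩ := hptest
      have hdk : (p:Int) ∣ (k:Int) := (PySem.Int.mod_eq_zero_iff_dvd _ _).mp hmod
      have hlowk : low ≤ (k:Int) := le_trans (le_max_left _ _) hmax
      have h2k : 2*(p:Int) ≤ (k:Int) := by
        obtain ⟨t, ht⟩ := hdk
        have h2t : (2:Int) ≤ t := by
          by_contra hh
          push_neg at hh
          have hm : (p:Int)*t ≤ (p:Int)*1 := mul_le_mul_of_nonneg_left (by omega) (by omega)
          have e : (p:Int)*1 = (p:Int) := by ring
          omega
        have hm : (p:Int)*2 ≤ (p:Int)*t := mul_le_mul_of_nonneg_left h2t (by omega)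
        have e : (p:Int)*2 = 2*(p:Int) := by ring
        omega
      refine ⟨(p:Int), List.mem_map.mpr ⟨p, hpP, rfl⟩, ?_⟩
      rw [PySem.List.mem_pyRange_iff_of_pos (by omega)]
      have hdl := (pv_lower_facts low (p:Int) hp2).1
      exact ⟨(pv_lower_le low _ _ hp2 hdk).mpr ⟨h2k, hlowk⟩, hkh, dvd_sub hdk hdl⟩
  simp only [hcond]

-- ===== VERDICT (by name: the statement is the Claim_ definition above) =====
theorem find_prime_range_spec : Claim_equal_find_prime_range := by
  intro low high _ hpre
  unfold Spec_find_prime_range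
  unfold Pre_find_prime_range at hpre
  exact pv_main low high hpre
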